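-- pv_equiv track=rewrite | github.com/Midoriii/Redundant-Sequence-Remover | rsr.py | sequences_match
-- ===== SOURCE A (Python) =====
-- def sequences_match(shorter, longer, reverse=False):
--     '''
--     Compares the given sequences letter by letter. If the whole shorter sequence
--     is not a part of the longer one, False is returned. The argument 'reverse'
--     controls, whether the comparison of the two sequences should start from
--     the front or from the back. Note that the sequences are only checked from
--     the start or from the end, substrings lying in the middle are not a concern.
--     '''
--     if reverse:
--         shorter = shorter[::-1]
--         longer = longer[::-1]
--
--     for a, b in zip(shorter, longer):
--         if a != b:
--             return False
--     return True
-- ===== SOURCE B (Python) =====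
-- def sequences_match(shorter, longer, reverse=False):
--     n = min(len(shorter), len(longer))
--     if reverse:
--         return shorter[len(shorter)-n:] == longer[len(longer)-n:]
--     return shorter[:n] == longer[:n]
-- ===== Notes on version B (the rewrite author's own statement) =====
-- stated objective: simpler
-- what changed: Replaces reverse-both-then-zip-and-compare-pair-by-pair with a single slice equality on the common prefix (or length-anchored common suffix) of length min(len(shorter), len(longer)).
import Mathlib
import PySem

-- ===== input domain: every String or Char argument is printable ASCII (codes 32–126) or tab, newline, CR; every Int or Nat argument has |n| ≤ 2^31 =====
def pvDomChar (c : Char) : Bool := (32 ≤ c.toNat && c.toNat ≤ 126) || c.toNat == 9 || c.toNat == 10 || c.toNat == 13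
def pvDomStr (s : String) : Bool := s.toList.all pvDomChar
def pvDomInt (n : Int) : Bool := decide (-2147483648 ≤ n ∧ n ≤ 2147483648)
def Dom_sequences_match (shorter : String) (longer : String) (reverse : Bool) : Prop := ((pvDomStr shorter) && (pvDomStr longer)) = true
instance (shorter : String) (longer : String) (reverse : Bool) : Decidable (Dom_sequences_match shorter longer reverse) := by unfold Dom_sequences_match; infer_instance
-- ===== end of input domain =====

-- B replaces the pairwise zip loop by one slice-equality on the common prefix/suffix of length min(len,len): simpler.

-- ===== PORT A =====
-- the 'for a, b in zip(...): if a != b: return False' loop, early return and all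
def pvZipLoop : List (Char × Char) → Bool
  | [] => true
  | (a, b) :: rest => if a ≠ b then false else pvZipLoop rest

def sequences_match (shorter : String) (longer : String) (reverse : Bool) : Bool :=
  -- s[::-1] is list reversal (PySem.List.slice?_none_none_neg_one)
  let s := if reverse then shorter.toList.reverse else shorter.toList
  let l := if reverse then longer.toList.reverse else longer.toList
  pvZipLoop (s.zip l)

-- ===== PORT B =====
def sequences_match_alt (shorter : String) (longer : String) (reverse : Bool) : Bool :=
  let s := shorter.toList
  let l := longer.toList
  let n := min s.length l.length
  if reverse then
    -- shorter[len(shorter)-n:] == longer[len(longer)-n:]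
    PySem.List.slice s (some ((s.length - n : Nat) : Int)) none
      == PySem.List.slice l (some ((l.length - n : Nat) : Int)) none
  else
    -- shorter[:n] == longer[:n]
    PySem.List.slice s none (some ((n : Nat) : Int))
      == PySem.List.slice l none (some ((n : Nat) : Int))

-- ===== PRECONDITION & SPEC =====
def Spec_sequences_match (shorter : String) (longer : String) (reverse : Bool) (out : Bool) : Prop := out = sequences_match_alt shorter longer reverse
instance (shorter : String) (longer : String) (reverse : Bool) (out : Bool) : Decidable (Spec_sequences_match shorter longer reverse out) := by unfold Spec_sequences_match; infer_instance

-- ===== CLAIM (what is proved, stated in full; the proofs are below) =====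
def Claim_equal_sequences_match : Prop := ∀ (shorter : String) (longer : String) (reverse : Bool), Dom_sequences_match shorter longer reverse → Spec_sequences_match shorter longer reverse (sequences_match shorter longer reverse)

-- ===== LEMMAS AND PROOFS =====

-- the zip loop decides equality of the min-length prefixes
theorem pvZipLoop_eq_take (as bs : List Char) :
    pvZipLoop (as.zip bs) = (as.take bs.length == bs.take as.length) := by
  induction as generalizing bs with
  | nil => cases bs <;> simp [pvZipLoop]
  | cons a as ih =>
    cases bs with
    | nil => simp [pvZipLoop]
    | cons b bs =>
      simp only [List.zip_cons_cons, pvZipLoop, List.length_cons, List.take_succ_cons, ih]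
      by_cases h : a = b <;> simp [h]

theorem take_min_left (as bs : List Char) :
    as.take (min as.length bs.length) = as.take bs.length := by
  rcases le_total as.length bs.length with h | h
  · rw [min_eq_left h, List.take_of_length_le h, List.take_of_length_le (Nat.le_refl _)]
  · rw [min_eq_right h]

theorem beq_reverse_reverse (x y : List Char) :
    (x.reverse == y.reverse) = (x == y) := by
  by_cases h : x = y
  · subst h; simp
  · have h' : x.reverse ≠ y.reverse := by simpa [List.reverse_inj] using h
    simp [h, h']

theorem sequences_match_spec : Claim_equal_sequences_match := by
  intro shorter longer reverse _
  unfold Spec_sequences_match sequences_match sequences_match_alt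
  cases reverse
  · simp only [Bool.false_eq_true, if_false]
    rw [pvZipLoop_eq_take, PySem.List.slice_to_natCast, PySem.List.slice_to_natCast,
      take_min_left, min_comm shorter.toList.length longer.toList.length, take_min_left]
  · simp only [if_true]
    rw [pvZipLoop_eq_take, PySem.List.slice_from_natCast, PySem.List.slice_from_natCast,
      List.length_reverse, List.length_reverse]
    have h1 : shorter.toList.reverse.take longer.toList.length
        = (shorter.toList.drop (shorter.toList.length
            - min shorter.toList.length longer.toList.length)).reverse := by
      rw [List.take_reverse]; congr 2; omega
    have h2 : longer.toList.reverse.take shorter.toList.length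
        = (longer.toList.drop (longer.toList.length
            - min shorter.toList.length longer.toList.length)).reverse := by
      rw [List.take_reverse]; congr 2; omega
    rw [h1, h2, beq_reverse_reverse]
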